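-- pv_equiv track=rewrite | github.com/pawel-czarnecki/codility-lessons | Lesson 3 - Time Complexity/TapeEquilibrium.py | solution
-- ===== SOURCE A (Python) =====
-- def solution(A):
--     B = []
--     minimum, x = 1000002, 0
--     for i in range(len(A)):
--         x += A[i]
--         B.append(x)
--
--     for i in range(len(B) - 1):
--         minimum = min(abs(B[len(B) - 1] - 2*B[i]), minimum)
--
--     return minimum
-- ===== SOURCE B (Python) =====
-- def solution(A):
--     total = sum(A)
--     left = 0
--     minimum = 1000002
--     for i in range(len(A) - 1):
--         left += A[i]
--         minimum = min(minimum, abs(total - 2 * left))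
--     return minimum
-- ===== Notes on version B (the rewrite author's own statement) =====
-- stated objective: simpler
-- what changed: B drops the stored prefix-sum list entirely: it computes the total once, then keeps a single running left-sum accumulator in one loop, updating the minimum of |total - 2*left| on the fly (O(1) extra space instead of O(n)).
import Mathlib
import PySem

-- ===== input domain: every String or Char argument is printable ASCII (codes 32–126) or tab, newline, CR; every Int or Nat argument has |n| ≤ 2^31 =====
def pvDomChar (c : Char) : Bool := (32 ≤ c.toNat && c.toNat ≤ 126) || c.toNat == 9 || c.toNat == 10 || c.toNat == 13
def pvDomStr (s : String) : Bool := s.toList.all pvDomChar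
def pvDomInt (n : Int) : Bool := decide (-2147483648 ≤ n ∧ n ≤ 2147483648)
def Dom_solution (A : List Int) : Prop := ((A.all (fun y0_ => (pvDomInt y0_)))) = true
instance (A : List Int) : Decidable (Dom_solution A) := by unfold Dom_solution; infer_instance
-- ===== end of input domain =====

-- B replaces A's stored prefix-sum list with a single running left-sum accumulator (simpler, O(1) extra space).


-- ===== PORT A =====
-- builds the prefix-sum list B, then scans it comparing 2*B[i] against B[-1]
def solution (A : List Int) : Int :=
  let st := (List.range A.length).foldl
      (fun (st : List Int × Int) i =>
        let x := st.2 + A.getD i 0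
        (st.1 ++ [x], x))
      ([], 0)
  let B := st.1
  (List.range (B.length - 1)).foldl
    (fun minimum i => min |B.getD (B.length - 1) 0 - 2 * B.getD i 0| minimum)
    1000002

-- ===== PORT B =====
-- one loop, running left-sum accumulator, no stored prefix list
def solution_alt (A : List Int) : Int :=
  let total := A.foldl (· + ·) 0
  let st := (List.range (A.length - 1)).foldl
      (fun (st : Int × Int) i =>
        let left := st.1 + A.getD i 0
        (left, min st.2 |total - 2 * left|))
      (0, 1000002)
  st.2

-- ===== PRECONDITION & SPEC =====
def Spec_solution (A : List Int) (out : Int) : Prop := out = solution_alt A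
instance (A : List Int) (out : Int) : Decidable (Spec_solution A out) := by unfold Spec_solution; infer_instance

-- ===== CLAIM (what is proved, stated in full; the proofs are below) =====
def Claim_equal_solution : Prop := ∀ (A : List Int), Dom_solution A → Spec_solution A (solution A)

-- ===== LEMMAS AND PROOFS =====

-- prefix sum of the first i+1 elements
def pvPre (A : List Int) (i : Nat) : Int := (A.take (i + 1)).sum

-- A's first loop builds exactly the list of prefix sums
theorem pvA_build (A : List Int) (n : Nat) (hn : n ≤ A.length) :
    (List.range n).foldl
      (fun (st : List Int × Int) i =>
        let x := st.2 + A.getD i 0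
        (st.1 ++ [x], x))
      ([], 0)
    = ((List.range n).map (pvPre A), (A.take n).sum) := by
  induction n with
  | zero => simp
  | succ k ih =>
    have hk : k ≤ A.length := Nat.le_of_succ_le hn
    have hklt : k < A.length := hn
    rw [List.range_succ, List.foldl_append, List.map_append, ih hk]
    simp only [List.foldl_cons, List.foldl_nil]
    have hget : A.getD k 0 = A[k] := List.getD_eq_getElem A 0 hklt
    have htake : A.take (k + 1) = A.take k ++ [A[k]] := by
      rw [List.take_add_one]; simp [List.getElem?_eq_getElem hklt]
    have hstep : (List.take k A).sum + A.getD k 0 = pvPre A k := by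
      rw [pvPre, htake, List.sum_append, hget]; simp
    rw [Prod.mk.injEq]
    refine ⟨by rw [hstep]; simp [pvPre], by rw [hstep, pvPre]⟩

-- B's loop: the running pair is (prefix sum, min-so-far over pvPre)
theorem pvB_loop (A : List Int) (T : Int) (k : Nat) (hk : k ≤ A.length) :
    (List.range k).foldl
      (fun (st : Int × Int) i =>
        let left := st.1 + A.getD i 0
        (left, min st.2 |T - 2 * left|))
      (0, 1000002)
    = ((A.take k).sum,
       (List.range k).foldl (fun μ i => min μ |T - 2 * pvPre A i|) 1000002) := by
  induction k with
  | zero => simp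
  | succ m ih =>
    have hm : m ≤ A.length := Nat.le_of_succ_le hk
    have hmlt : m < A.length := hk
    rw [List.range_succ, List.foldl_append, List.foldl_append, ih hm]
    simp only [List.foldl_cons, List.foldl_nil]
    have hget : A.getD m 0 = A[m] := List.getD_eq_getElem A 0 hmlt
    have htake : A.take (m + 1) = A.take m ++ [A[m]] := by
      rw [List.take_add_one]; simp [List.getElem?_eq_getElem hmlt]
    have hstep : (List.take m A).sum + A.getD m 0 = pvPre A m := by
      rw [pvPre, htake, List.sum_append, hget]; simp
    rw [Prod.mk.injEq]
    refine ⟨by rw [hstep, pvPre], by rw [hstep]⟩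

theorem solution_eq (A : List Int) : solution A = solution_alt A := by
  unfold solution solution_alt
  simp only [pvA_build A A.length le_rfl, pvB_loop A (A.foldl (· + ·) 0) (A.length - 1) (Nat.sub_le _ _)]
  have hlen : ((List.range A.length).map (pvPre A)).length = A.length := by simp
  rw [hlen]
  have htotal : A.foldl (· + ·) 0 = A.sum := by
    rw [List.sum_eq_foldl]
  rcases Nat.eq_zero_or_pos A.length with h0 | hpos
  · simp [h0]
  · have hlast : ((List.range A.length).map (pvPre A)).getD (A.length - 1) 0 = A.sum := by
      have h1 : A.length - 1 < A.length := Nat.sub_lt hpos Nat.one_pos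
      rw [List.getD_eq_getElem _ 0 (by simpa using h1)]
      simp [pvPre, Nat.sub_add_cancel hpos]
    rw [hlast, htotal]
    apply PySem.List.foldl_congr_mem
    intro μ i hi
    have hi' : i < A.length - 1 := List.mem_range.mp hi
    have hilt : i < A.length := lt_of_lt_of_le hi' (Nat.sub_le _ _)
    rw [List.getD_eq_getElem _ 0 (by simpa using hilt)]
    simp [pvPre, min_comm]

-- ===== VERDICT (by name: the statement is the Claim_ definition above) =====
theorem solution_spec : Claim_equal_solution := by
  intro A _
  unfold Spec_solution
  exact solution_eq A
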